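-- pv_equiv track=rewrite | github.com/sbryan7/MObB-Analysis-Tool | MObB_Analysis_Program.py | getatomcomp
-- ===== SOURCE A (Python) =====
-- def getatomcomp(seq,AAcompmap):
--     atomcomp=list()
--     for q in range(0,len(seq)):
--         Carbon=AAcompmap[seq[q]][0]
--         Hydrogen=AAcompmap[seq[q]][1]
--         Nitrogen=AAcompmap[seq[q]][2]
--         Oxygen=AAcompmap[seq[q]][3]
--         Sulfur=AAcompmap[seq[q]][4]
--         atomcomp.append([Carbon,Hydrogen,Nitrogen,Oxygen,Sulfur])
--
--     atomcomp=[ sum(row[i] for row in atomcomp) for i in range(len(atomcomp[0])) ]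
--     return atomcomp
-- ===== SOURCE B (Python) =====
-- def getatomcomp(seq, AAcompmap):
--     total = list(AAcompmap[seq[0]][0:5])
--     for ch in seq[1:]:
--         row = AAcompmap[ch]
--         total = [t + row[i] for i, t in enumerate(total)]
--     return total
-- ===== Notes on version B (the rewrite author's own statement) =====
-- stated objective: simpler
-- what changed: B keeps a single running 5-element total updated element-wise per residue instead of building the full per-residue table and then summing each column.
import Mathlib
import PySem

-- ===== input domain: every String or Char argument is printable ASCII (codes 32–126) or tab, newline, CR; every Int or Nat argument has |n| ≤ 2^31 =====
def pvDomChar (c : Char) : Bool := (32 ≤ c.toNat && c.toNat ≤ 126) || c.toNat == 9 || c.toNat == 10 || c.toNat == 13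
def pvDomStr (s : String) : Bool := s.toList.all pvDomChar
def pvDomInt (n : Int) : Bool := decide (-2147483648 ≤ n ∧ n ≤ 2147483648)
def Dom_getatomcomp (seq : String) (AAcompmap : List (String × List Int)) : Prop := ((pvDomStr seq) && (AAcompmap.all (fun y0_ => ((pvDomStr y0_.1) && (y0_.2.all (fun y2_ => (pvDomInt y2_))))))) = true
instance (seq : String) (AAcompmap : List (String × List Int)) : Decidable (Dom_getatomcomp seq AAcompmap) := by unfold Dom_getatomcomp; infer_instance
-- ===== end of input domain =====

-- B replaces A's build-per-residue-table-then-sum-each-column with one accumulating pass over the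
-- sequence (simpler; same cost).

-- ===== PORT A =====
def getatomcomp (seq : String) (AAcompmap : List (String × List Int)) : List Int :=
  let m := PySem.Dict.mk AAcompmap
  let atomcomp : List (List Int) :=
    (PySem.List.pyRange 0 (PySem.Str.len seq) 1).foldl (fun acc q =>
      let row := m.getD (String.ofList [PySem.List.pyGetD seq.toList q ' ']) []
      acc ++ [[PySem.List.pyGetD row 0 0, PySem.List.pyGetD row 1 0, PySem.List.pyGetD row 2 0,
               PySem.List.pyGetD row 3 0, PySem.List.pyGetD row 4 0]]) []
  (PySem.List.pyRange 0 (PySem.List.len (PySem.List.pyGetD atomcomp 0 [])) 1).map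
    (fun i => atomcomp.foldl (fun acc row => acc + PySem.List.pyGetD row i 0) 0)

-- ===== PORT B =====
def getatomcomp_alt (seq : String) (AAcompmap : List (String × List Int)) : List Int :=
  let m := PySem.Dict.mk AAcompmap
  let total0 := PySem.List.slice (m.getD (String.ofList [PySem.List.pyGetD seq.toList 0 ' ']) []) (some 0) (some 5)
  (PySem.List.slice seq.toList (some 1) none).foldl (fun total ch =>
    let row := m.getD (String.ofList [ch]) []
    (PySem.List.enumerate total 0).map (fun p => p.2 + PySem.List.pyGetD row p.1 0))
    total0

-- ===== PRECONDITION & SPEC =====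
-- Pre_ excludes the inputs on which A raises: an empty sequence (IndexError on atomcomp[0]),
-- a residue missing from the map (KeyError) or mapped to fewer than 5 numbers (IndexError).
def Pre_getatomcomp (seq : String) (AAcompmap : List (String × List Int)) : Prop :=
  seq.toList ≠ [] ∧ (seq.toList.all (fun c =>
    5 ≤ ((PySem.Dict.mk AAcompmap).getD (String.ofList [c]) []).length)) = true
instance (seq : String) (AAcompmap : List (String × List Int)) : Decidable (Pre_getatomcomp seq AAcompmap) := by unfold Pre_getatomcomp; infer_instance
def pvWitness_getatomcomp : String × (List (String × List Int)) :=
  ("G", [("G", [2, 3, 1, 1, 0])])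
def Spec_getatomcomp (seq : String) (AAcompmap : List (String × List Int)) (out : List Int) : Prop := out = getatomcomp_alt seq AAcompmap
instance (seq : String) (AAcompmap : List (String × List Int)) (out : List Int) : Decidable (Spec_getatomcomp seq AAcompmap out) := by unfold Spec_getatomcomp; infer_instance

-- ===== CLAIM (what is proved, stated in full; the proofs are below) =====
def Claim_equal_getatomcomp : Prop := ∀ (seq : String) (AAcompmap : List (String × List Int)), Dom_getatomcomp seq AAcompmap → Pre_getatomcomp seq AAcompmap → Spec_getatomcomp seq AAcompmap (getatomcomp seq AAcompmap)

-- ===== LEMMAS AND PROOFS =====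

-- first five entries of a list of length ≥ 5, as pyGetD literals
theorem slice_five (r : List Int) (h : 5 ≤ r.length) :
    PySem.List.slice r (some 0) (some 5)
    = [PySem.List.pyGetD r 0 0, PySem.List.pyGetD r 1 0, PySem.List.pyGetD r 2 0,
       PySem.List.pyGetD r 3 0, PySem.List.pyGetD r 4 0] := by
  match r, h with
  | a :: b :: c :: d :: e :: rest, _ =>
    simp [PySem.List.slice_to, PySem.List.pyGetD, PySem.List.pyGet?, PySem.List.pyIdx?]
    refine ⟨?_, ?_, ?_, ?_, ?_⟩ <;>
      · split_ifs with h0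
        · simp
        · omega

-- the i-th atom count of residue c under map m
def colf (m : PySem.Dict String (List Int)) (c : Char) (i : Int) : Int :=
  PySem.List.pyGetD (m.getD (String.ofList [c]) []) i 0

theorem B_fold (m : PySem.Dict String (List Int)) (l : List Char) (t0 t1 t2 t3 t4 : Int) :
    l.foldl (fun total ch =>
        let row := m.getD (String.ofList [ch]) []
        (PySem.List.enumerate total 0).map (fun p => p.2 + PySem.List.pyGetD row p.1 0))
      [t0, t1, t2, t3, t4]
    = [l.foldl (fun a c => a + colf m c 0) t0,
       l.foldl (fun a c => a + colf m c 1) t1,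
       l.foldl (fun a c => a + colf m c 2) t2,
       l.foldl (fun a c => a + colf m c 3) t3,
       l.foldl (fun a c => a + colf m c 4) t4] := by
  induction l generalizing t0 t1 t2 t3 t4 with
  | nil => rfl
  | cons c cs ih =>
    simp only [List.foldl_cons, PySem.List.enumerate, List.map]
    rw [ih]
    rfl

theorem A_table (m : PySem.Dict String (List Int)) (seq : String) :
    (PySem.List.pyRange 0 (PySem.Str.len seq) 1).foldl (fun acc q =>
      let row := m.getD (String.ofList [PySem.List.pyGetD seq.toList q ' ']) []
      acc ++ [[PySem.List.pyGetD row 0 0, PySem.List.pyGetD row 1 0, PySem.List.pyGetD row 2 0,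
               PySem.List.pyGetD row 3 0, PySem.List.pyGetD row 4 0]]) []
    = seq.toList.map (fun c => [colf m c 0, colf m c 1, colf m c 2, colf m c 3, colf m c 4]) := by
  rw [PySem.Str.len_eq]
  simp only [colf]
  rw [PySem.List.foldl_pyRange_zero_pyGetD' seq.toList ' '
      (fun acc ch =>
        let row := m.getD (String.ofList [ch]) []
        acc ++ [[PySem.List.pyGetD row 0 0, PySem.List.pyGetD row 1 0, PySem.List.pyGetD row 2 0,
                 PySem.List.pyGetD row 3 0, PySem.List.pyGetD row 4 0]]) []]
  simpa using PySem.List.foldl_append_singleton_eq_map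
    (fun c => [colf m c 0, colf m c 1, colf m c 2, colf m c 3, colf m c 4]) seq.toList []

-- ===== VERDICT (by name: the statement is the Claim_ definition above) =====
theorem getatomcomp_spec : Claim_equal_getatomcomp := by
  intro seq M _ hpre
  obtain ⟨hne, hall⟩ := hpre
  unfold Spec_getatomcomp getatomcomp getatomcomp_alt
  simp only []
  rw [A_table]
  obtain ⟨c, cs, hseq⟩ := List.exists_cons_of_ne_nil hne
  have h5 : 5 ≤ ((PySem.Dict.mk M).getD (String.ofList [seq.toList.headI]) []).length := by
    rw [List.all_eq_true] at hall
    have := hall seq.toList.headI (by rw [hseq]; exact List.mem_cons_self)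
    exact of_decide_eq_true this
  rw [hseq] at h5 ⊢
  simp only [List.headI] at h5
  rw [PySem.List.slice_from_one, PySem.List.pyGetD_zero_cons, slice_five _ h5]
  simp only [List.map_cons, PySem.List.pyGetD_zero_cons, List.tail_cons]
  rw [B_fold]
  norm_num [PySem.List.pyRange, List.foldl_map, colf, PySem.List.pyGetD, PySem.List.pyIdx?]
  simp [List.range_succ]
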